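-- pv_equiv track=rewrite | github.com/iwen-conf/Skills | Arc/arc:uml/scripts/review_uml_pack.py | extract_mermaid_source
-- ===== SOURCE A (Python) =====
-- def extract_mermaid_source(content: str) -> str:
--     stripped = content.strip()
--     if stripped.startswith("sequenceDiagram"):
--         return stripped + "\n"
--
--     lines = content.splitlines()
--     capturing = False
--     captured: list[str] = []
--
--     for line in lines:
--         trimmed = line.strip()
--         if trimmed.startswith("sequenceDiagram"):
--             capturing = True
--         if capturing:
--             if trimmed.startswith("```") and captured:
--                 break
--             if not trimmed.startswith("```"):
--                 captured.append(line.rstrip())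
--
--     source = "\n".join(captured).strip()
--     if source.startswith("sequenceDiagram"):
--         return source + "\n"
--     return stripped + ("\n" if stripped else "")
-- ===== SOURCE B (Python) =====
-- def _collect(lines):
--     """Recursively collect rstripped lines up to (excluding) the first fence line."""
--     if not lines or lines[0].strip().startswith("```"):
--         return []
--     return [lines[0].rstrip()] + _collect(lines[1:])
--
--
-- def _find_block(lines):
--     """Recursively skip lines until one whose strip starts with the diagram
--     header; return the collected block from there, or None if never found."""
--     if not lines:
--         return None
--     if lines[0].strip().startswith("sequenceDiagram"):
--         return _collect(lines)
--     return _find_block(lines[1:])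
--
--
-- def extract_mermaid_source(content: str) -> str:
--     stripped = content.strip()
--     if stripped.startswith("sequenceDiagram"):
--         return stripped + "\n"
--
--     block = _find_block(content.splitlines())
--     if block is not None:
--         source = "\n".join(block).strip()
--         if source.startswith("sequenceDiagram"):
--             return source + "\n"
--     return stripped + ("\n" if stripped else "")
-- ===== Notes on version B (the rewrite author's own statement) =====
-- stated objective: alternative
-- what changed: Replaces A's single stateful pass (capturing flag, mutable accumulator, break) with a recursive two-phase decomposition: one recursive helper skips lines until the diagram header and returns an optional block, a second recursive helper builds the block front-to-back up to the first fence; there is no loop, flag or mutable state.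
import Mathlib
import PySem

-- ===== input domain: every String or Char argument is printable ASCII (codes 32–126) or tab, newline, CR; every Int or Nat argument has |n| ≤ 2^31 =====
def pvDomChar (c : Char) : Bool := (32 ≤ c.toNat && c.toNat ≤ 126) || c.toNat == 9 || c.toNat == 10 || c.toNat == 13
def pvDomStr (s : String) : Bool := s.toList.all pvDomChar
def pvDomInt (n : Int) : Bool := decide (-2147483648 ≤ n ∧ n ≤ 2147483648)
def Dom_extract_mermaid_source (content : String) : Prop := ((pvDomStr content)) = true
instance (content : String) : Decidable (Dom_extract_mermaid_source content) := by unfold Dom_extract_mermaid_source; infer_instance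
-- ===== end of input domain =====

-- B replaces A's single stateful flag-flipping pass with a recursive two-phase decomposition
-- (skip lines until the header, then recursively collect up to the first fence); alternative structure, same cost.

-- ===== PORT A =====
-- A's for-loop with `capturing` flag, `captured` accumulator and `break`.
def pvALoop : List String → Bool → List String → List String
  | [], _, captured => captured
  | line :: rest, capturing, captured =>
    let trimmed := PySem.Str.strip line
    let capturing := capturing || PySem.Str.startswith trimmed "sequenceDiagram"
    if capturing then
      if PySem.Str.startswith trimmed "```" && !captured.isEmpty then
        captured
      else if !(PySem.Str.startswith trimmed "```") then
        pvALoop rest capturing (captured ++ [PySem.Str.rstrip line])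
      else
        pvALoop rest capturing captured
    else
      pvALoop rest capturing captured

def extract_mermaid_source (content : String) : String :=
  let stripped := PySem.Str.strip content
  if PySem.Str.startswith stripped "sequenceDiagram" then stripped ++ "\n"
  else
    let lines := PySem.Str.splitlines content
    let captured := pvALoop lines false []
    let source := PySem.Str.strip (PySem.Str.join "\n" captured)
    if PySem.Str.startswith source "sequenceDiagram" then source ++ "\n"
    else stripped ++ (if stripped = "" then "" else "\n")

-- ===== PORT B =====
-- recursive helper `_collect`: rstripped lines up to (excluding) the first fence line
def pvCollect : List String → List String
  | [] => []
  | l :: rest =>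
    if PySem.Str.startswith (PySem.Str.strip l) "```" then []
    else [PySem.Str.rstrip l] ++ pvCollect rest

-- recursive helper `_find_block`: skip lines until the diagram header, then collect; None if never found
def pvFindBlock : List String → Option (List String)
  | [] => none
  | l :: rest =>
    if PySem.Str.startswith (PySem.Str.strip l) "sequenceDiagram" then some (pvCollect (l :: rest))
    else pvFindBlock rest

def extract_mermaid_source_alt (content : String) : String :=
  let stripped := PySem.Str.strip content
  if PySem.Str.startswith stripped "sequenceDiagram" then stripped ++ "\n"
  else
    match pvFindBlock (PySem.Str.splitlines content) with
    | some block =>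
        let source := PySem.Str.strip (PySem.Str.join "\n" block)
        if PySem.Str.startswith source "sequenceDiagram" then source ++ "\n"
        else stripped ++ (if stripped = "" then "" else "\n")
    | none => stripped ++ (if stripped = "" then "" else "\n")

-- ===== PRECONDITION & SPEC =====
def Spec_extract_mermaid_source (content : String) (out : String) : Prop := out = extract_mermaid_source_alt content
instance (content : String) (out : String) : Decidable (Spec_extract_mermaid_source content out) := by unfold Spec_extract_mermaid_source; infer_instance

-- ===== CLAIM (what is proved, stated in full; the proofs are below) =====
def Claim_equal_extract_mermaid_source : Prop := ∀ (content : String), Dom_extract_mermaid_source content → Spec_extract_mermaid_source content (extract_mermaid_source content)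

-- ===== LEMMAS AND PROOFS =====

-- predicates on a line, used only by the proofs
def pvSeqP (ln : String) : Bool := PySem.Str.startswith (PySem.Str.strip ln) "sequenceDiagram"
def pvFenceP (ln : String) : Bool := PySem.Str.startswith (PySem.Str.strip ln) "```"

-- a line whose strip starts with "sequenceDiagram" does not start with "```"
theorem pvSeq_not_fence (ln : String) (h : pvSeqP ln = true) : pvFenceP ln = false := by
  unfold pvSeqP at h
  unfold pvFenceP
  by_contra hf
  rw [Bool.not_eq_false] at hf
  simp only [PySem.Str.startswith_eq] at h hf
  rw [PySem.Chars.startswith_iff] at h hf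
  have := List.prefix_of_prefix_length_le hf h (by simp)
  revert this
  decide

-- B's collector is rstrip mapped over the lines before the first fence
theorem pvCollect_eq (xs : List String) :
    pvCollect xs = (xs.takeWhile (fun l => !pvFenceP l)).map PySem.Str.rstrip := by
  induction xs with
  | nil => rfl
  | cons l rest ih =>
    by_cases hf : pvFenceP l = true
    · have hf' : PySem.Str.startswith (PySem.Str.strip l) "```" = true := hf
      simp only [pvCollect, hf', if_true, List.takeWhile_cons, hf, Bool.not_true,
        Bool.false_eq_true, if_false, List.map_nil]
    · rw [Bool.not_eq_true] at hf
      have hf' : PySem.Str.startswith (PySem.Str.strip l) "```" = false := hf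
      simp only [pvCollect, hf', Bool.false_eq_true, if_false, List.takeWhile_cons, hf,
        Bool.not_false, if_true, List.map_cons, ih, List.singleton_append]

-- once capturing with nonempty captured, A's loop appends rstrip of lines up to the first fence
theorem pvALoop_cap (rest : List String) : ∀ c : List String, c ≠ [] →
    pvALoop rest true c = c ++ (rest.takeWhile (fun l => !pvFenceP l)).map PySem.Str.rstrip := by
  induction rest with
  | nil => intro c _; simp [pvALoop]
  | cons l rest ih =>
    intro c hc
    have hce : c.isEmpty = false := List.isEmpty_eq_false_iff.mpr hc
    by_cases hf : pvFenceP l = true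
    · have hf' : PySem.Str.startswith (PySem.Str.strip l) "```" = true := hf
      simp only [pvALoop, hf', hce, Bool.true_or, Bool.not_false, Bool.and_true, if_true,
        List.takeWhile_cons, hf, Bool.not_true, Bool.false_eq_true, if_false, List.map_nil,
        List.append_nil]
    · rw [Bool.not_eq_true] at hf
      have hf' : PySem.Str.startswith (PySem.Str.strip l) "```" = false := hf
      simp only [pvALoop, hf', hce, Bool.true_or, Bool.false_and, Bool.not_false, if_true,
        Bool.false_eq_true, if_false, List.takeWhile_cons, hf, Bool.not_false, List.map_cons]
      rw [ih (c ++ [PySem.Str.rstrip l]) (by simp)]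
      simp

-- A's whole loop from the initial state equals B's recursive search
theorem pvALoop_main (lines : List String) :
    pvALoop lines false [] = (pvFindBlock lines).getD [] := by
  induction lines with
  | nil => rfl
  | cons l rest ih =>
    by_cases hs : pvSeqP l = true
    · have hseq : PySem.Str.startswith (PySem.Str.strip l) "sequenceDiagram" = true := hs
      have hf : pvFenceP l = false := pvSeq_not_fence l hs
      have hf' : PySem.Str.startswith (PySem.Str.strip l) "```" = false := hf
      simp only [pvALoop, hseq, hf', Bool.or_true, if_true, Bool.false_and, Bool.not_false,
        Bool.false_eq_true, if_false, List.nil_append]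
      rw [pvALoop_cap rest [PySem.Str.rstrip l] (by simp)]
      simp only [pvFindBlock, hseq, if_true, Option.getD_some, pvCollect, hf',
        Bool.false_eq_true, if_false, List.singleton_append]
      rw [pvCollect_eq rest]
    · rw [Bool.not_eq_true] at hs
      have hseq : PySem.Str.startswith (PySem.Str.strip l) "sequenceDiagram" = false := hs
      simp only [pvALoop, hseq, Bool.or_false, Bool.false_eq_true, if_false]
      rw [ih]
      simp only [pvFindBlock, hseq, Bool.false_eq_true, if_false]

-- ===== VERDICT (by name: the statement is the Claim_ definition above) =====
theorem extract_mermaid_source_spec : Claim_equal_extract_mermaid_source := by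
  intro content _
  unfold Spec_extract_mermaid_source extract_mermaid_source extract_mermaid_source_alt
  by_cases h1 : PySem.Str.startswith (PySem.Str.strip content) "sequenceDiagram" = true
  · simp only [h1, if_true]
  · rw [Bool.not_eq_true] at h1
    simp only [h1, Bool.false_eq_true, if_false]
    rw [pvALoop_main]
    cases h : pvFindBlock (PySem.Str.splitlines content) with
    | none =>
        simp only [Option.getD_none]
        have e : PySem.Str.startswith (PySem.Str.strip (PySem.Str.join "\n" ([] : List String)))
            "sequenceDiagram" = false := by decide
        simp only [e, Bool.false_eq_true, if_false]
    | some b =>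
        simp only [Option.getD_some]
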